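-- pv_equiv track=rewrite | github.com/Hotsumm/BOJ-Programmers-Solution | Programmers/Level2/전력망을둘로나누기.py | solution
-- ===== SOURCE A (Python) =====
-- from collections import deque
--
-- def bfs(a,graph,visited):
--     count = 1
--     deq = deque()
--     deq.append(a)
--     visited[a] = 1
--     while deq:
--         curr = deq.popleft()
--         for _next in graph[curr]:
--             if not visited[_next]:
--                 count += 1
--                 visited[_next] = 1
--                 deq.append(_next)
--     return count
--
-- def solution(n, wires):
--     answer = 99
--     graph = [[] for _ in range(n+1)]
--
--     for a,b in wires:
--         graph[a].append(b)
--         graph[b].append(a)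
--
--     for a,b in wires:
--         visited = [0] * (n+1)
--         visited[b]= 1
--         result = bfs(a,graph,visited)
--         _abs = abs((result*2) - n )
--         answer = min(answer, _abs)
--
--     return answer
-- ===== SOURCE B (Python) =====
-- def solution(n, wires):
--     best = 99
--     for a, b in wires:
--         reach = [False] * (n + 1)
--         blocked = [False] * (n + 1)
--         reach[a] = True
--         blocked[b] = True
--         changed = True
--         while changed:
--             changed = False
--             for x, y in wires:
--                 if reach[x] and not blocked[y] and not reach[y]:
--                     reach[y] = True
--                     changed = True
--                 if reach[y] and not blocked[x] and not reach[x]: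
--                     reach[x] = True
--                     changed = True
--         size = sum(reach)
--         best = min(best, abs(2 * size - n))
--     return best
-- ===== Notes on version B (the rewrite author's own statement) =====
-- stated objective: alternative
-- what changed: Per removed wire, A builds an adjacency list and flood-fills from one endpoint with a BFS deque; B builds no graph at all: it repeats Bellman-Ford-style relaxation passes directly over the raw wire list (reach/blocked boolean arrays, iterate until a pass changes nothing) and sums the reach array; equality is proved via a common cell-level reachability relation.
import Mathlib
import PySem

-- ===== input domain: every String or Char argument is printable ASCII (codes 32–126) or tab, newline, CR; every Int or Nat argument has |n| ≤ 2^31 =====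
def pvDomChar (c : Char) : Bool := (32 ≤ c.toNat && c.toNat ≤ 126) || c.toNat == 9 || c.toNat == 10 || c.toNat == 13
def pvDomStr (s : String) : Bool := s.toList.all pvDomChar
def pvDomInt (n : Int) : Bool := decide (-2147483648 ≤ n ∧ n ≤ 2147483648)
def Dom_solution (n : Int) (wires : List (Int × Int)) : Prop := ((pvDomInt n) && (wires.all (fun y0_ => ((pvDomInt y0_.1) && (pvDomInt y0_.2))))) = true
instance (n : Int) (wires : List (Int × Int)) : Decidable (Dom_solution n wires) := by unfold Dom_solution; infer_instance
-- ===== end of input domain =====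

-- B replaces A's per-edge BFS over an adjacency list (deque + marking counter) by a
-- per-edge fixpoint relaxation over the raw wire list (no adjacency list, no queue):
-- repeat passes over the wires, propagating reachability, until nothing changes
-- (objective: alternative — same results, proved via a cell-level reachability relation).

-- ===== PORT A =====

-- index/assignment bridges (used by the termination lemmas below and by the proofs)
theorem pv_pyIdx_lt {len : Nat} {y : Int} {c : Nat} (h : PySem.List.pyIdx? len y = some c) :
    c < len := by
  unfold PySem.List.pyIdx? at h
  split_ifs at h with h1 h2 h3 <;> simp_all <;> omega

theorem pv_pyGetD_some {α : Type} {v : List α} {y : Int} {c : Nat}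
    (h : PySem.List.pyIdx? v.length y = some c) (d : α) :
    PySem.List.pyGetD v y d = v.getD c d := by
  simp [PySem.List.pyGetD, PySem.List.pyGet?, h, List.getD_eq_getElem?_getD]

theorem pv_pyGetD_none {α : Type} {v : List α} {y : Int}
    (h : PySem.List.pyIdx? v.length y = none) (d : α) :
    PySem.List.pyGetD v y d = d := by
  simp [PySem.List.pyGetD, PySem.List.pyGet?, h]

theorem pv_pySetD_some {α : Type} {v : List α} {y : Int} {c : Nat}
    (h : PySem.List.pyIdx? v.length y = some c) (x : α) :
    PySem.List.pySetD v y x = v.set c x := by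
  simp [PySem.List.pySetD, PySem.List.pySet?, h]

theorem pv_count_set (v : List Int) (j : Nat) (hj : j < v.length) (h0 : v[j] = 0) :
    (v.set j 1).count 0 + 1 = v.count 0 := by
  induction v generalizing j with
  | nil => simp at hj
  | cons a t ih =>
    cases j with
    | zero => simp_all
    | succ k =>
      simp only [List.set_cons_succ, List.count_cons]
      have := ih k (by simpa using hj) (by simpa using h0)
      omega

-- A's graph-building loop body (graph[a].append(b); graph[b].append(a))
def pvBuildStep (g : List (List Int)) (ab : Int × Int) : List (List Int) :=
  let g1 := PySem.List.pySetD g ab.1 (PySem.List.pyGetD g ab.1 [] ++ [ab.2])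
  PySem.List.pySetD g1 ab.2 (PySem.List.pyGetD g1 ab.2 [] ++ [ab.1])

-- the body of A's `for _next in graph[curr]` loop, threading (count, visited, deque-tail)
def pvInnerA (st : Int × List Int × List Int) (ns : List Int) : Int × List Int × List Int :=
  ns.foldl (fun st y =>
    if PySem.List.pyGetD st.2.1 y 1 = 0 then
      (st.1 + 1, PySem.List.pySetD st.2.1 y 1, st.2.2 ++ [y])
    else st) st

-- termination helpers for the while-loops (number of 0 cells in visited decreases per marking)
theorem pv_mark_count (v : List Int) (y : Int) (h : PySem.List.pyGetD v y 1 = 0) :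
    (PySem.List.pySetD v y 1).count 0 + 1 = v.count 0 := by
  cases hc : PySem.List.pyIdx? v.length y with
  | none => rw [pv_pyGetD_none hc] at h; omega
  | some c =>
    have hlt := pv_pyIdx_lt hc
    rw [pv_pyGetD_some hc] at h
    rw [pv_pySetD_some hc]
    refine pv_count_set v c hlt ?_
    rwa [List.getD_eq_getElem?_getD, List.getElem?_eq_getElem hlt, Option.getD_some] at h

theorem pvInnerA_measure (ns : List Int) (st : Int × List Int × List Int) :
    2 * (pvInnerA st ns).2.1.count 0 + (pvInnerA st ns).2.2.length ≤
      2 * st.2.1.count 0 + st.2.2.length := by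
  induction ns generalizing st with
  | nil => simp [pvInnerA]
  | cons y ns ih =>
    have hstep : pvInnerA st (y :: ns)
        = pvInnerA (if PySem.List.pyGetD st.2.1 y 1 = 0 then
            (st.1 + 1, PySem.List.pySetD st.2.1 y 1, st.2.2 ++ [y]) else st) ns := by
      simp [pvInnerA, List.foldl_cons]
    rw [hstep]
    split_ifs with h
    · have hm := pv_mark_count st.2.1 y h
      have := ih (st.1 + 1, PySem.List.pySetD st.2.1 y 1, st.2.2 ++ [y])
      simp only [List.length_append, List.length_cons, List.length_nil] at this ⊢
      omega
    · exact ih st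

-- A's `while deq:` loop; the deque is a Lean list (popleft = head, append = ++ [y])
def pvBfsLoop (graph : List (List Int)) (deq : List Int) (visited : List Int) (count : Int) :
    Int :=
  match deq with
  | [] => count
  | curr :: rest =>
      let st := pvInnerA (count, visited, rest) (PySem.List.pyGetD graph curr [])
      pvBfsLoop graph st.2.2 st.2.1 st.1
termination_by 2 * visited.count 0 + deq.length
decreasing_by
  have h := pvInnerA_measure (PySem.List.pyGetD graph curr []) (count, visited, rest)
  simp only [List.length_cons] at h ⊢
  omega

-- def bfs(a, graph, visited)
def pvBfsA (a : Int) (graph : List (List Int)) (visited : List Int) : Int :=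
  pvBfsLoop graph [a] (PySem.List.pySetD visited a 1) 1

def solution (n : Int) (wires : List (Int × Int)) : Int :=
  let graph := wires.foldl pvBuildStep (List.replicate (n + 1).toNat ([] : List Int))
  wires.foldl (fun answer ab =>
      let visited := PySem.List.pySetD (List.replicate (n + 1).toNat (0 : Int)) ab.2 1
      let result := pvBfsA ab.1 graph visited
      min answer |result * 2 - n|) 99

-- ===== PORT B =====

-- termination helpers for B's fixpoint loop (number of False cells decreases per marking)
theorem pv_count_set_bool (v : List Bool) (j : Nat) (hj : j < v.length) (h0 : v[j] = false) :
    (v.set j true).count false + 1 = v.count false := by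
  induction v generalizing j with
  | nil => simp at hj
  | cons a t ih =>
    cases j with
    | zero => simp_all
    | succ k =>
      simp only [List.set_cons_succ, List.count_cons]
      have := ih k (by simpa using hj) (by simpa using h0)
      omega

theorem pv_false_cell {v : List Bool} {t : Int} (h : PySem.List.pyGetD v t true = false) :
    ∃ c, PySem.List.pyIdx? v.length t = some c ∧ c < v.length ∧ v.getD c true = false := by
  cases hc : PySem.List.pyIdx? v.length t with
  | none => rw [pv_pyGetD_none hc] at h; exact absurd h (by simp)
  | some c =>
    exact ⟨c, rfl, pv_pyIdx_lt hc, by rwa [pv_pyGetD_some hc] at h⟩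

theorem pv_getD_false {v : List Bool} {c : Nat} (hc : c < v.length) (h : v.getD c true = false) :
    v[c] = false := by
  rwa [List.getD_eq_getElem?_getD, List.getElem?_eq_getElem hc, Option.getD_some] at h

-- one directed relaxation `if reach[s] and not blocked[t] and not reach[t]: …` of B, threading
-- (reach, changed).  The out-of-range defaults (false / true / true) make the guard fail where
-- Python would raise IndexError; under Pre_ every read is in range, so they are never used.
def pvMark (blocked : List Bool) (st : List Bool × Bool) (s t : Int) : List Bool × Bool :=
  if PySem.List.pyGetD st.1 s false = true ∧ PySem.List.pyGetD blocked t true = false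
      ∧ PySem.List.pyGetD st.1 t true = false then
    (PySem.List.pySetD st.1 t true, true)
  else st

-- the body of B's `for x, y in wires:` loop: relax x → y then y → x
def pvStepB (blocked : List Bool) (st : List Bool × Bool) (p : Int × Int) : List Bool × Bool :=
  pvMark blocked (pvMark blocked st p.1 p.2) p.2 p.1

-- one full pass of B's inner for-loop over the wire list
def pvPass (blocked : List Bool) (wires : List (Int × Int)) (st : List Bool × Bool) :
    List Bool × Bool :=
  wires.foldl (pvStepB blocked) st

theorem pvMark_cases (blocked : List Bool) (st : List Bool × Bool) (s t : Int) :
    pvMark blocked st s t = st ∨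
      ((pvMark blocked st s t).1.count false < st.1.count false ∧
        (pvMark blocked st s t).2 = true) := by
  unfold pvMark
  split_ifs with h
  · right
    obtain ⟨c, hc, hlt, hgd⟩ := pv_false_cell h.2.2
    have hF := pv_getD_false hlt hgd
    have hcnt := pv_count_set_bool st.1 c hlt hF
    refine ⟨?_, rfl⟩
    simp only [pv_pySetD_some hc true]
    omega
  · exact Or.inl rfl

theorem pvStepB_cases (blocked : List Bool) (st : List Bool × Bool) (p : Int × Int) :
    pvStepB blocked st p = st ∨
      ((pvStepB blocked st p).1.count false < st.1.count false ∧
        (pvStepB blocked st p).2 = true) := by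
  unfold pvStepB
  rcases pvMark_cases blocked st p.1 p.2 with h1 | ⟨h1, f1⟩
  · rw [h1]
    exact pvMark_cases blocked st p.2 p.1
  · rcases pvMark_cases blocked (pvMark blocked st p.1 p.2) p.2 p.1 with h2 | ⟨h2, f2⟩
    · rw [h2]; exact Or.inr ⟨h1, f1⟩
    · exact Or.inr ⟨lt_trans h2 h1, f2⟩

theorem pvPass_cases (blocked : List Bool) (l : List (Int × Int)) :
    ∀ st : List Bool × Bool, pvPass blocked l st = st ∨
      ((pvPass blocked l st).1.count false < st.1.count false ∧
        (pvPass blocked l st).2 = true) := by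
  induction l with
  | nil => intro st; exact Or.inl rfl
  | cons p t ih =>
    intro st
    have hstep : pvPass blocked (p :: t) st = pvPass blocked t (pvStepB blocked st p) := rfl
    rw [hstep]
    rcases pvStepB_cases blocked st p with h1 | ⟨h1, f1⟩
    · rw [h1]; exact ih st
    · rcases ih (pvStepB blocked st p) with h2 | ⟨h2, f2⟩
      · rw [h2]; exact Or.inr ⟨h1, f1⟩
      · exact Or.inr ⟨lt_trans h2 h1, f2⟩

theorem pvPass_progress (blocked : List Bool) (wires : List (Int × Int)) (r : List Bool)
    (h : (pvPass blocked wires (r, false)).2 = true) :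
    (pvPass blocked wires (r, false)).1.count false < r.count false := by
  rcases pvPass_cases blocked wires (r, false) with he | ⟨hlt, -⟩
  · rw [he] at h; simp at h
  · exact hlt

-- B's `while changed:` loop (the initial changed=True only enters the loop; each iteration
-- resets changed to False and runs one pass)
def pvLoop (blocked : List Bool) (wires : List (Int × Int)) (reach : List Bool) : List Bool :=
  if (pvPass blocked wires (reach, false)).2 = true then
    pvLoop blocked wires (pvPass blocked wires (reach, false)).1
  else (pvPass blocked wires (reach, false)).1
termination_by reach.count false
decreasing_by exact pvPass_progress blocked wires reach (by assumption)

def solution_alt (n : Int) (wires : List (Int × Int)) : Int :=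
  wires.foldl (fun best ab =>
    let reach := PySem.List.pySetD (List.replicate (n + 1).toNat false) ab.1 true
    let blocked := PySem.List.pySetD (List.replicate (n + 1).toNat false) ab.2 true
    let rf := pvLoop blocked wires reach
    let size := rf.foldl (fun s v => s + if v then (1 : Int) else 0) 0  -- sum(reach)
    min best |2 * size - n|) 99

-- ===== PRECONDITION & SPEC =====
-- Pre_ excludes exactly the inputs where A raises IndexError: some wire endpoint is not a
-- valid Python index into the (n+1)-cell vertex arrays.
def Pre_solution (n : Int) (wires : List (Int × Int)) : Prop :=
  ∀ p ∈ wires, PySem.Raise.InRange (n + 1).toNat p.1 ∧ PySem.Raise.InRange (n + 1).toNat p.2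
instance (n : Int) (wires : List (Int × Int)) : Decidable (Pre_solution n wires) := by
  unfold Pre_solution; infer_instance

def pvWitness_solution : Int × (List (Int × Int)) := (4, [(1, 2), (2, 3), (3, 4)])

def Spec_solution (n : Int) (wires : List (Int × Int)) (out : Int) : Prop := out = solution_alt n wires
instance (n : Int) (wires : List (Int × Int)) (out : Int) : Decidable (Spec_solution n wires out) := by unfold Spec_solution; infer_instance

-- ===== CLAIM (what is proved, stated in full; the proofs are below) =====
def Claim_equal_solution : Prop := ∀ (n : Int) (wires : List (Int × Int)), Dom_solution n wires → Pre_solution n wires → Spec_solution n wires (solution n wires)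

-- ===== LEMMAS AND PROOFS =====

-- generic getD-after-set bridges
theorem pv_getD_set_self {α : Type} (v : List α) (c : Nat) (x d : α) (hc : c < v.length) :
    (v.set c x).getD c d = x := by
  rw [List.getD_eq_getElem?_getD, List.getElem?_set_self (by simpa using hc)]
  rfl

theorem pv_getD_set_ne {α : Type} (v : List α) (c e : Nat) (x d : α) (hne : e ≠ c) :
    (v.set c x).getD e d = v.getD e d := by
  rw [List.getD_eq_getElem?_getD, List.getElem?_set_ne (by omega), ← List.getD_eq_getElem?_getD]

theorem pv_getD_replicate {α : Type} (len c : Nat) (a d : α) :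
    (List.replicate len a).getD c d = if c < len then a else d := by
  rw [List.getD_eq_getElem?_getD, List.getElem?_replicate]
  split_ifs <;> rfl

theorem pv_getD_lt {α : Type} (v : List α) (c : Nat) (hc : c < v.length) (d : α) :
    v.getD c d = v[c] := by
  rw [List.getD_eq_getElem?_getD, List.getElem?_eq_getElem hc, Option.getD_some]

-- cells newly markable from a list of raw neighbour labels
def pvNew (len : Nat) (v : List Int) (ns : List Int) : Set Nat :=
  {d | (∃ y ∈ ns, PySem.List.pyIdx? len y = some d) ∧ v.getD d 1 = 0}

-- adjacency list of a cell
def pvAdj (g : List (List Int)) (c : Nat) : List Int := g.getD c []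

-- cells of a worklist
def pvCells (len : Nat) (q : List Int) : Set Nat :=
  {c | ∃ y ∈ q, PySem.List.pyIdx? len y = some c}

-- unvisited cells reachable from the source cells through unvisited cells
def pvReach (len : Nat) (g : List (List Int)) (v : List Int) (S0 : Set Nat) : Set Nat :=
  {d | v.getD d 1 = 0 ∧
     ∃ c ∈ S0, Relation.ReflTransGen (fun a b => b ∈ pvNew len v (pvAdj g a)) c d}

-- worklist invariant: every entry is a valid label whose cell is already marked
def pvInv (len : Nat) (v : List Int) (q : List Int) : Prop :=
  ∀ y ∈ q, ∃ c, PySem.List.pyIdx? len y = some c ∧ v.getD c 1 ≠ 0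

-- the cell-level edge relation of the wire list
def pvE (len : Nat) (wires : List (Int × Int)) (c d : Nat) : Prop :=
  ∃ p ∈ wires, (PySem.List.pyIdx? len p.1 = some c ∧ PySem.List.pyIdx? len p.2 = some d) ∨
    (PySem.List.pyIdx? len p.1 = some d ∧ PySem.List.pyIdx? len p.2 = some c)

-- one admissible search step at cell level: an edge into an in-range cell that is neither
-- the start ca nor the blocked cb
def pvStepR (len ca cb : Nat) (wires : List (Int × Int)) (c d : Nat) : Prop :=
  pvE len wires c d ∧ d < len ∧ d ≠ ca ∧ d ≠ cb

-- the marked set both programs compute: cells reachable from ca by admissible steps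
def pvM (len ca cb : Nat) (wires : List (Int × Int)) : Set Nat :=
  {d | Relation.ReflTransGen (pvStepR len ca cb wires) ca d}

theorem pvNew_finite (len : Nat) (v ns : List Int) : (pvNew len v ns).Finite := by
  refine Set.Finite.subset (Set.finite_Iio len) ?_
  rintro d ⟨⟨y, _, hy⟩, _⟩
  exact pv_pyIdx_lt hy

theorem pv_cells_append (len : Nat) (q : List Int) (y : Int) (cy : Nat)
    (h : PySem.List.pyIdx? len y = some cy) :
    pvCells len (q ++ [y]) = pvCells len q ∪ {cy} := by
  ext d
  simp only [pvCells, Set.mem_setOf_eq, List.mem_append, List.mem_singleton, Set.mem_union,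
    Set.mem_singleton_iff]
  constructor
  · rintro ⟨y', hy' | rfl, hidx⟩
    · exact Or.inl ⟨y', hy', hidx⟩
    · rw [h] at hidx; exact Or.inr (by injection hidx.symm)
  · rintro (⟨y', hy', hidx⟩ | rfl)
    · exact ⟨y', Or.inl hy', hidx⟩
    · exact ⟨y, Or.inr rfl, h⟩

theorem pv_cells_cons (len : Nat) (q : List Int) (y : Int) (cy : Nat)
    (h : PySem.List.pyIdx? len y = some cy) :
    pvCells len (y :: q) = pvCells len q ∪ {cy} := by
  ext d
  simp only [pvCells, Set.mem_setOf_eq, List.mem_cons, Set.mem_union, Set.mem_singleton_iff]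
  constructor
  · rintro ⟨y', rfl | hy', hidx⟩
    · rw [h] at hidx; exact Or.inr (by injection hidx.symm)
    · exact Or.inl ⟨y', hy', hidx⟩
  · rintro (⟨y', hy', hidx⟩ | rfl)
    · exact ⟨y', Or.inr hy', hidx⟩
    · exact ⟨y, Or.inl rfl, h⟩

theorem pv_new_cons_mark (len : Nat) (v : List Int) (ns : List Int) (y : Int) (cy : Nat)
    (hvlen : v.length = len)
    (hidx : PySem.List.pyIdx? len y = some cy) (h0 : v.getD cy 1 = 0) :
    pvNew len v (y :: ns) = insert cy (pvNew len (v.set cy 1) ns) := by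
  have hcy : cy < v.length := hvlen ▸ pv_pyIdx_lt hidx
  ext d
  simp only [pvNew, Set.mem_setOf_eq, List.mem_cons, Set.mem_insert_iff]
  constructor
  · rintro ⟨⟨y', rfl | hy', hi⟩, hd0⟩
    · rw [hidx] at hi; exact Or.inl (by injection hi.symm)
    · by_cases hdc : d = cy
      · exact Or.inl hdc
      · exact Or.inr ⟨⟨y', hy', hi⟩, by rwa [pv_getD_set_ne v cy d 1 1 hdc]⟩
  · rintro (rfl | ⟨⟨y', hy', hi⟩, hd1⟩)
    · exact ⟨⟨y, Or.inl rfl, hidx⟩, h0⟩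
    · have hdc : d ≠ cy := by
        rintro rfl; rw [pv_getD_set_self v d 1 1 hcy] at hd1; exact one_ne_zero hd1
      exact ⟨⟨y', Or.inr hy', hi⟩, by rwa [pv_getD_set_ne v cy d 1 1 hdc] at hd1⟩

theorem pv_not_mem_new_set (len : Nat) (v : List Int) (ns : List Int) (cy : Nat)
    (hcy : cy < v.length) : cy ∉ pvNew len (v.set cy 1) ns := by
  rintro ⟨-, h1⟩
  rw [pv_getD_set_self v cy 1 1 hcy] at h1
  exact one_ne_zero h1

theorem pv_new_cons_skip (len : Nat) (v : List Int) (ns : List Int) (y : Int)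
    (hvlen : v.length = len) (h : PySem.List.pyGetD v y 1 ≠ 0) :
    pvNew len v (y :: ns) = pvNew len v ns := by
  ext d
  simp only [pvNew, Set.mem_setOf_eq, List.mem_cons]
  constructor
  · rintro ⟨⟨y', rfl | hy', hi⟩, hd0⟩
    · exact absurd (by rw [pv_pyGetD_some (show PySem.List.pyIdx? v.length y' = some d by rwa [hvlen]) 1]; exact hd0) h
    · exact ⟨⟨y', hy', hi⟩, hd0⟩
  · rintro ⟨⟨y', hy', hi⟩, hd0⟩
    exact ⟨⟨y', Or.inr hy', hi⟩, hd0⟩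

theorem pvInnerA_char (len : Nat) :
    ∀ (ns : List Int) (c : Int) (v q : List Int), v.length = len →
      (pvInnerA (c, v, q) ns).2.1.length = len ∧
      (pvInnerA (c, v, q) ns).1 = c + ((pvNew len v ns).ncard : Int) ∧
      (∀ d ∈ pvNew len v ns, (pvInnerA (c, v, q) ns).2.1.getD d 1 = 1) ∧
      (∀ d, d ∉ pvNew len v ns → (pvInnerA (c, v, q) ns).2.1.getD d 1 = v.getD d 1) ∧
      pvCells len (pvInnerA (c, v, q) ns).2.2 = pvCells len q ∪ pvNew len v ns ∧
      (pvInv len v q → pvInv len (pvInnerA (c, v, q) ns).2.1 (pvInnerA (c, v, q) ns).2.2) := by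
  intro ns
  induction ns with
  | nil =>
    intro c v q hvlen
    have hempty : pvNew len v [] = ∅ := by
      ext d; simp [pvNew]
    refine ⟨hvlen, ?_, ?_, fun d _ => rfl, ?_, fun h => h⟩
    · show c = c + ((pvNew len v []).ncard : Int)
      rw [hempty]; simp
    · rw [hempty]; intro d hd; exact absurd hd (Set.notMem_empty d)
    · show pvCells len q = pvCells len q ∪ pvNew len v []
      rw [hempty]; simp
  | cons y ns ih =>
    intro c v q hvlen
    have hstep : pvInnerA (c, v, q) (y :: ns)
        = pvInnerA (if PySem.List.pyGetD v y 1 = 0 then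
            (c + 1, PySem.List.pySetD v y 1, q ++ [y]) else (c, v, q)) ns := by
      simp only [pvInnerA, List.foldl_cons]
    by_cases h : PySem.List.pyGetD v y 1 = 0
    · -- marking case
      cases hc : PySem.List.pyIdx? v.length y with
      | none => rw [pv_pyGetD_none hc 1] at h; exact absurd h one_ne_zero
      | some cy =>
        have hcylt : cy < v.length := pv_pyIdx_lt hc
        have h0 : v.getD cy 1 = 0 := by rwa [pv_pyGetD_some hc 1] at h
        have hidx : PySem.List.pyIdx? len y = some cy := by rwa [hvlen] at hc
        have hset : PySem.List.pySetD v y 1 = v.set cy 1 := pv_pySetD_some hc 1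
        rw [hstep, if_pos h, hset]
        have hv1len : (v.set cy 1).length = len := by simpa using hvlen
        obtain ⟨ih1, ih2, ih3, ih4, ih5, ih6⟩ := ih (c + 1) (v.set cy 1) (q ++ [y]) hv1len
        have hsplit := pv_new_cons_mark len v ns y cy hvlen hidx h0
        have hnm : cy ∉ pvNew len (v.set cy 1) ns := pv_not_mem_new_set len v ns cy hcylt
        have hcard : (pvNew len v (y :: ns)).ncard = (pvNew len (v.set cy 1) ns).ncard + 1 := by
          rw [hsplit, Set.ncard_insert_of_notMem hnm (pvNew_finite len _ ns)]
        refine ⟨ih1, ?_, ?_, ?_, ?_, ?_⟩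
        · rw [ih2, hcard]; push_cast; ring
        · intro d hd
          rw [hsplit, Set.mem_insert_iff] at hd
          rcases hd with rfl | hd
          · rw [ih4 d hnm, pv_getD_set_self v d 1 1 hcylt]
          · exact ih3 d hd
        · intro d hd
          rw [hsplit, Set.mem_insert_iff] at hd
          push Not at hd
          rw [ih4 d hd.2, pv_getD_set_ne v cy d 1 1 hd.1]
        · rw [ih5, pv_cells_append len q y cy hidx, hsplit]
          ext e
          simp only [Set.mem_union, Set.mem_insert_iff, Set.mem_singleton_iff]
          tauto
        · intro hinv
          refine ih6 ?_
          intro y' hy'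
          rcases List.mem_append.mp hy' with hy' | hy'
          · obtain ⟨c', hc', hnz⟩ := hinv y' hy'
            refine ⟨c', hc', ?_⟩
            by_cases he : c' = cy
            · subst he; rw [pv_getD_set_self v c' 1 1 hcylt]; exact one_ne_zero
            · rwa [pv_getD_set_ne v cy c' 1 1 he]
          · rw [List.mem_singleton] at hy'; subst hy'
            exact ⟨cy, hidx, by rw [pv_getD_set_self v cy 1 1 hcylt]; exact one_ne_zero⟩
    · -- skip case
      rw [hstep, if_neg h]
      have hskip := pv_new_cons_skip len v ns y hvlen h
      obtain ⟨ih1, ih2, ih3, ih4, ih5, ih6⟩ := ih c v q hvlen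
      exact ⟨ih1, by rw [ih2, hskip], by rw [hskip]; exact ih3, by rw [hskip]; exact ih4,
        by rw [ih5, hskip], ih6⟩

theorem pvReach_finite (len : Nat) (g : List (List Int)) (v : List Int) (S0 : Set Nat)
    (hv : v.length = len) : (pvReach len g v S0).Finite := by
  refine Set.Finite.subset (Set.finite_Iio len) ?_
  rintro d ⟨h0, -⟩
  by_contra hd
  simp only [Set.mem_Iio, not_lt] at hd
  rw [List.getD_eq_getElem?_getD, List.getElem?_eq_none (by omega)] at h0
  simp at h0

-- target of a nonreflexive reach-path is unvisited
theorem pv_rtg_target (len : Nat) (g : List (List Int)) (v : List Int) {a b : Nat}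
    (h : Relation.ReflTransGen (fun a b => b ∈ pvNew len v (pvAdj g a)) a b) :
    b = a ∨ v.getD b 1 = 0 := by
  rcases Relation.ReflTransGen.cases_tail h with h | ⟨c, _, hstep⟩
  · exact Or.inl h
  · exact Or.inr hstep.2

theorem pvKey (len : Nat) (g : List (List Int)) (v v' : List Int) (cx : Nat) (Q : Set Nat)
    (hcx : v.getD cx 1 ≠ 0)
    (hQ : ∀ c ∈ Q, v.getD c 1 ≠ 0)
    (hmark : ∀ d ∈ pvNew len v (pvAdj g cx), v'.getD d 1 = 1)
    (hkeep : ∀ d, d ∉ pvNew len v (pvAdj g cx) → v'.getD d 1 = v.getD d 1) :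
    pvReach len g v (insert cx Q)
      = pvNew len v (pvAdj g cx) ∪ pvReach len g v' (Q ∪ pvNew len v (pvAdj g cx)) := by
  set N := pvNew len v (pvAdj g cx) with hN
  have hsub : ∀ a, pvNew len v' (pvAdj g a) ⊆ pvNew len v (pvAdj g a) := by
    rintro a d ⟨hy, h0⟩
    have hdN : d ∉ N := by
      intro hdN; rw [hmark d hdN] at h0; exact one_ne_zero h0
    exact ⟨hy, by rwa [hkeep d hdN] at h0⟩
  have hstep' : ∀ a d, d ∈ pvNew len v (pvAdj g a) → v'.getD d 1 = 0 →
      d ∈ pvNew len v' (pvAdj g a) := by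
    rintro a d ⟨hy, _⟩ h0; exact ⟨hy, h0⟩
  ext d
  constructor
  · rintro ⟨h0, c0, hc0, hrtg⟩
    by_cases hdN : d ∈ N
    · exact Or.inl hdN
    · refine Or.inr ?_
      have hd0' : v'.getD d 1 = 0 := by rwa [hkeep d hdN]
      refine ⟨hd0', ?_⟩
      clear h0 hdN
      induction hrtg with
      | refl =>
        rcases Set.mem_insert_iff.mp hc0 with h | h
        · subst h
          exfalso
          have hdN : c0 ∉ N := fun hdN => by rw [hmark _ hdN] at hd0'; exact one_ne_zero hd0'
          rw [hkeep _ hdN] at hd0'; exact hcx hd0'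
        · exfalso
          have hdN : c0 ∉ N := fun hdN => by rw [hmark _ hdN] at hd0'; exact one_ne_zero hd0'
          rw [hkeep _ hdN] at hd0'; exact hQ _ h hd0'
      | tail hab hbc ih =>
        rename_i p d'
        by_cases hp : v'.getD p 1 = 0
        · obtain ⟨w, hw, hwp⟩ := ih hp
          exact ⟨w, hw, hwp.tail (hstep' _ _ hbc hd0')⟩
        · by_cases hpN : p ∈ N
          · exact ⟨p, Or.inr hpN, Relation.ReflTransGen.single (hstep' _ _ hbc hd0')⟩
          · have hpv : v.getD p 1 ≠ 0 := by rwa [hkeep _ hpN] at hp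
            rcases pv_rtg_target len g v hab with heq | h0p
            · subst heq
              rcases Set.mem_insert_iff.mp hc0 with h | h
              · subst h
                exfalso
                have : d' ∈ N := hbc
                rw [hmark _ this] at hd0'; exact one_ne_zero hd0'
              · exact ⟨p, Or.inl h, Relation.ReflTransGen.single (hstep' _ _ hbc hd0')⟩
            · exact absurd h0p hpv
  · rintro (hdN | ⟨h0', c, hc, hrtg⟩)
    · exact ⟨hdN.2, cx, Set.mem_insert _ _, Relation.ReflTransGen.single hdN⟩
    · have hdN : d ∉ N := fun h => by rw [hmark _ h] at h0'; exact one_ne_zero h0'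
      have h0 : v.getD d 1 = 0 := by rwa [hkeep _ hdN] at h0'
      have hmono : Relation.ReflTransGen (fun a b => b ∈ pvNew len v (pvAdj g a)) c d :=
        Relation.ReflTransGen.mono (fun a b h => hsub a h) hrtg
      rcases hc with hcQ | hcN
      · exact ⟨h0, c, Set.mem_insert_of_mem _ hcQ, hmono⟩
      · exact ⟨h0, cx, Set.mem_insert _ _, Relation.ReflTransGen.head hcN hmono⟩

theorem pvKey_card (len : Nat) (g : List (List Int)) (v v' : List Int) (cx : Nat) (Q : Set Nat)
    (hv'len : v'.length = len)
    (hcx : v.getD cx 1 ≠ 0)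
    (hQ : ∀ c ∈ Q, v.getD c 1 ≠ 0)
    (hmark : ∀ d ∈ pvNew len v (pvAdj g cx), v'.getD d 1 = 1)
    (hkeep : ∀ d, d ∉ pvNew len v (pvAdj g cx) → v'.getD d 1 = v.getD d 1) :
    (pvReach len g v (insert cx Q)).ncard
      = (pvNew len v (pvAdj g cx)).ncard
        + (pvReach len g v' (Q ∪ pvNew len v (pvAdj g cx))).ncard := by
  rw [pvKey len g v v' cx Q hcx hQ hmark hkeep]
  refine Set.ncard_union_eq ?_ (pvNew_finite len v _) (pvReach_finite len g v' _ hv'len)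
  rw [Set.disjoint_left]
  rintro d hdN ⟨h0', -⟩
  rw [hmark d hdN] at h0'
  exact one_ne_zero h0'

theorem pv_cells_nil (len : Nat) : pvCells len [] = ∅ := by
  ext d; simp [pvCells]

theorem pv_reach_empty (len : Nat) (g : List (List Int)) (v : List Int) :
    pvReach len g v ∅ = ∅ := by
  ext d; simp [pvReach]

theorem pv_cells_marked (len : Nat) (v : List Int) (q : List Int) (hinv : pvInv len v q) :
    ∀ c ∈ pvCells len q, v.getD c 1 ≠ 0 := by
  rintro c ⟨y, hy, hi⟩
  obtain ⟨c', hc', hnz⟩ := hinv y hy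
  rw [hc'] at hi
  injection hi with hi
  rwa [← hi]

theorem pvBfsLoop_spec (len : Nat) (g : List (List Int)) (hg : g.length = len) :
    ∀ (q v : List Int) (c : Int), v.length = len → pvInv len v q →
      pvBfsLoop g q v c = c + ((pvReach len g v (pvCells len q)).ncard : Int) := by
  intro q v c
  induction q, v, c using pvBfsLoop.induct g with
  | case1 v c =>
    intro hv hinv
    rw [pv_cells_nil, pv_reach_empty]
    simp [pvBfsLoop]
  | case2 v c curr rest st ih =>
    intro hv hinv
    obtain ⟨cx, hcx, hmk⟩ := hinv curr List.mem_cons_self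
    have hgidx : PySem.List.pyIdx? g.length curr = some cx := by rw [hg]; exact hcx
    have hns : PySem.List.pyGetD g curr [] = pvAdj g cx := pv_pyGetD_some hgidx []
    have hst : st = pvInnerA (c, v, rest) (pvAdj g cx) := by rw [← hns]
    rw [hst] at ih
    obtain ⟨c1, c2, c3, c4, c5, c6⟩ := pvInnerA_char len (pvAdj g cx) c v rest hv
    have hinvrest : pvInv len v rest := fun y hy => hinv y (List.mem_cons_of_mem _ hy)
    have hQ := pv_cells_marked len v rest hinvrest
    have hkey := pvKey_card len g v
      (pvInnerA (c, v, rest) (pvAdj g cx)).2.1 cx (pvCells len rest) c1 hmk hQ c3 c4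
    have hcells : pvCells len (curr :: rest) = insert cx (pvCells len rest) := by
      rw [pv_cells_cons len rest curr cx hcx, Set.union_singleton]
    rw [pvBfsLoop]
    show pvBfsLoop g (pvInnerA (c, v, rest) (PySem.List.pyGetD g curr [])).2.2
        (pvInnerA (c, v, rest) (PySem.List.pyGetD g curr [])).2.1
        (pvInnerA (c, v, rest) (PySem.List.pyGetD g curr [])).1 = _
    rw [hns, ih c1 (c6 hinvrest), c5, c2, hcells, hkey]
    push_cast
    ring

theorem pv_idx_exists {len : Nat} {i : Int} (h : PySem.Raise.InRange len i) :
    ∃ c, PySem.List.pyIdx? len i = some c := by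
  obtain ⟨h1, h2⟩ := h
  unfold PySem.List.pyIdx?
  split_ifs <;> exact ⟨_, rfl⟩

theorem pv_graph_length (wires : List (Int × Int)) (g0 : List (List Int)) :
    (wires.foldl pvBuildStep g0).length = g0.length := by
  induction wires generalizing g0 with
  | nil => rfl
  | cons ab t ih =>
    rw [List.foldl_cons, ih]
    simp [pvBuildStep, PySem.List.length_pySetD]

-- adjacency after a set (used by the graph-build characterization)
theorem pv_adj_set (g : List (List Int)) (c : Nat) (L : List Int) (e : Nat) (hne : e ≠ c) :
    pvAdj (g.set c L) e = pvAdj g e := by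
  unfold pvAdj
  exact pv_getD_set_ne g c e L [] hne

theorem pv_adj_set_self (g : List (List Int)) (c : Nat) (L : List Int) (hc : c < g.length) :
    pvAdj (g.set c L) c = L := by
  unfold pvAdj
  exact pv_getD_set_self g c L [] hc

-- what one pvBuildStep does to adjacency membership
theorem pv_build_step_mem (len : Nat) (g : List (List Int)) (hg : g.length = len)
    (p : Int × Int) (c1 c2 : Nat)
    (h1 : PySem.List.pyIdx? len p.1 = some c1) (h2 : PySem.List.pyIdx? len p.2 = some c2)
    (c : Nat) (y : Int) :
    (y ∈ pvAdj (pvBuildStep g p) c ↔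
      y ∈ pvAdj g c ∨ (c = c1 ∧ y = p.2) ∨ (c = c2 ∧ y = p.1)) := by
  have hc1 : c1 < len := pv_pyIdx_lt h1
  have hc2 : c2 < len := pv_pyIdx_lt h2
  have hidx1 : PySem.List.pyIdx? g.length p.1 = some c1 := by rw [hg]; exact h1
  have hL1 : PySem.List.pyGetD g p.1 [] = pvAdj g c1 := pv_pyGetD_some hidx1 []
  have hg1len : (g.set c1 (pvAdj g c1 ++ [p.2])).length = len := by simpa using hg
  have hidx2 : PySem.List.pyIdx? (g.set c1 (pvAdj g c1 ++ [p.2])).length p.2 = some c2 := by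
    rw [hg1len]; exact h2
  have hL2 : PySem.List.pyGetD (g.set c1 (pvAdj g c1 ++ [p.2])) p.2 []
      = pvAdj (g.set c1 (pvAdj g c1 ++ [p.2])) c2 := pv_pyGetD_some hidx2 []
  have hbuild : pvBuildStep g p = (g.set c1 (pvAdj g c1 ++ [p.2])).set c2
      (pvAdj (g.set c1 (pvAdj g c1 ++ [p.2])) c2 ++ [p.1]) := by
    show PySem.List.pySetD (PySem.List.pySetD g p.1 (PySem.List.pyGetD g p.1 [] ++ [p.2])) p.2
        (PySem.List.pyGetD (PySem.List.pySetD g p.1 (PySem.List.pyGetD g p.1 [] ++ [p.2])) p.2 []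
          ++ [p.1]) = _
    rw [hL1, pv_pySetD_some hidx1 (pvAdj g c1 ++ [p.2]), hL2]
    exact pv_pySetD_some hidx2 _
  set g1 := g.set c1 (pvAdj g c1 ++ [p.2]) with hg1def
  have hadj1 : ∀ e, pvAdj g1 e = if e = c1 then pvAdj g c1 ++ [p.2] else pvAdj g e := by
    intro e
    split_ifs with he
    · rw [he]; exact pv_adj_set_self g c1 _ (by omega)
    · exact pv_adj_set g c1 _ e he
  have hadj2 : pvAdj (pvBuildStep g p) c
      = if c = c2 then pvAdj g1 c2 ++ [p.1] else pvAdj g1 c := by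
    rw [hbuild]
    split_ifs with he
    · rw [he]; exact pv_adj_set_self g1 c2 _ (by omega)
    · exact pv_adj_set g1 c2 _ c he
  rw [hadj2]
  by_cases hcc2 : c = c2
  · subst hcc2
    rw [if_pos rfl, hadj1 c]
    by_cases hcc1 : c = c1
    · subst hcc1
      rw [if_pos rfl]
      simp only [List.mem_append, List.mem_singleton]
      tauto
    · rw [if_neg hcc1]
      simp only [List.mem_append, List.mem_singleton]
      tauto
  · rw [if_neg hcc2, hadj1 c]
    by_cases hcc1 : c = c1
    · subst hcc1
      rw [if_pos rfl]
      simp only [List.mem_append, List.mem_singleton]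
      tauto
    · rw [if_neg hcc1]
      tauto

-- adjacency of the built graph, characterized by the wire list
theorem pv_build_adj (len : Nat) :
    ∀ (wires : List (Int × Int)),
      (∀ p ∈ wires, PySem.Raise.InRange len p.1 ∧ PySem.Raise.InRange len p.2) →
      ∀ (g0 : List (List Int)), g0.length = len → ∀ (c : Nat) (y : Int),
        (y ∈ pvAdj (wires.foldl pvBuildStep g0) c ↔ y ∈ pvAdj g0 c ∨ ∃ p ∈ wires,
          (PySem.List.pyIdx? len p.1 = some c ∧ p.2 = y) ∨
          (PySem.List.pyIdx? len p.2 = some c ∧ p.1 = y)) := by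
  intro wires
  induction wires with
  | nil => intro _ g0 _ c y; simp
  | cons p t ih =>
    intro hw g0 hg0 c y
    obtain ⟨c1, h1⟩ := pv_idx_exists (hw p List.mem_cons_self).1
    obtain ⟨c2, h2⟩ := pv_idx_exists (hw p List.mem_cons_self).2
    have hg1len : (pvBuildStep g0 p).length = len := by
      have := pv_graph_length [p] g0
      simpa [pv_graph_length, pvBuildStep, PySem.List.length_pySetD] using hg0
    rw [List.foldl_cons,
      ih (fun q hq => hw q (List.mem_cons_of_mem _ hq)) (pvBuildStep g0 p) hg1len c y,
      pv_build_step_mem len g0 hg0 p c1 c2 h1 h2 c y]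
    constructor
    · rintro ((hy | ⟨rfl, rfl⟩ | ⟨rfl, rfl⟩) | ⟨q, hq, hor⟩)
      · exact Or.inl hy
      · exact Or.inr ⟨p, List.mem_cons_self, Or.inl ⟨h1, rfl⟩⟩
      · exact Or.inr ⟨p, List.mem_cons_self, Or.inr ⟨h2, rfl⟩⟩
      · exact Or.inr ⟨q, List.mem_cons_of_mem _ hq, hor⟩
    · rintro (hy | ⟨q, hq, hor⟩)
      · exact Or.inl (Or.inl hy)
      · rcases List.mem_cons.mp hq with rfl | hq
        · rcases hor with ⟨hc, rfl⟩ | ⟨hc, rfl⟩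
          · rw [h1] at hc; injection hc with hc
            exact Or.inl (Or.inr (Or.inl ⟨hc.symm, rfl⟩))
          · rw [h2] at hc; injection hc with hc
            exact Or.inl (Or.inr (Or.inr ⟨hc.symm, rfl⟩))
        · exact Or.inr ⟨q, hq, hor⟩

-- basic facts about pvM
theorem pvM_lt {len ca cb : Nat} {wires : List (Int × Int)} (hca : ca < len) {d : Nat}
    (hd : d ∈ pvM len ca cb wires) : d < len := by
  rcases Relation.ReflTransGen.cases_tail hd with h | ⟨c, _, hstep⟩
  · omega
  · exact hstep.2.1

theorem pvM_closed {len ca cb : Nat} {wires : List (Int × Int)} {c d : Nat}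
    (hc : c ∈ pvM len ca cb wires) (h : pvStepR len ca cb wires c d) : d ∈ pvM len ca cb wires :=
  Relation.ReflTransGen.tail hc h

-- the marked-visited array of A's per-edge BFS, characterized cellwise
theorem pv_v2_char (len : Nat) (a b : Int) (ca cb : Nat)
    (ha : PySem.List.pyIdx? len a = some ca) (hb : PySem.List.pyIdx? len b = some cb) :
    ∀ d, (PySem.List.pySetD (PySem.List.pySetD (List.replicate len (0 : Int)) b 1) a 1).getD d 1
        = 0 ↔ (d < len ∧ d ≠ ca ∧ d ≠ cb) := by
  intro d
  have hcb : cb < len := pv_pyIdx_lt hb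
  have hca : ca < len := pv_pyIdx_lt ha
  have hb' : PySem.List.pyIdx? (List.replicate len (0 : Int)).length b = some cb := by
    rw [List.length_replicate]; exact hb
  have hset1 : PySem.List.pySetD (List.replicate len (0 : Int)) b 1
      = (List.replicate len (0 : Int)).set cb 1 := pv_pySetD_some hb' 1
  have ha' : PySem.List.pyIdx? ((List.replicate len (0 : Int)).set cb 1).length a = some ca := by
    rw [List.length_set, List.length_replicate]; exact ha
  rw [hset1, pv_pySetD_some ha' 1]
  by_cases hdca : d = ca
  · rw [hdca, pv_getD_set_self _ ca 1 1 (by simpa using hca)]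
    simp
  · rw [pv_getD_set_ne _ ca d 1 1 hdca]
    by_cases hdcb : d = cb
    · rw [hdcb, pv_getD_set_self _ cb 1 1 (by simpa using hcb)]
      simp
    · rw [pv_getD_set_ne _ cb d 1 1 hdcb, pv_getD_replicate]
      split_ifs with hd <;> simp_all

-- one pvNew-step out of an in-range cell is exactly one admissible cell step
theorem pv_new_step_iff (len : Nat) (wires : List (Int × Int))
    (g : List (List Int)) (hgadj : ∀ (c : Nat) (y : Int),
      (y ∈ pvAdj g c ↔ ∃ p ∈ wires,
        (PySem.List.pyIdx? len p.1 = some c ∧ p.2 = y) ∨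
        (PySem.List.pyIdx? len p.2 = some c ∧ p.1 = y)))
    (v2 : List Int) (ca cb : Nat)
    (hv2 : ∀ d, v2.getD d 1 = 0 ↔ (d < len ∧ d ≠ ca ∧ d ≠ cb))
    (c d : Nat) :
    d ∈ pvNew len v2 (pvAdj g c) ↔ pvStepR len ca cb wires c d := by
  constructor
  · rintro ⟨⟨y, hy, hyd⟩, hv0⟩
    obtain ⟨hd1, hd2, hd3⟩ := (hv2 d).mp hv0
    refine ⟨?_, hd1, hd2, hd3⟩
    rcases (hgadj c y).mp hy with ⟨p, hp, ⟨hc, rfl⟩ | ⟨hc, rfl⟩⟩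
    · exact ⟨p, hp, Or.inl ⟨hc, hyd⟩⟩
    · exact ⟨p, hp, Or.inr ⟨hyd, hc⟩⟩
  · rintro ⟨⟨p, hp, ⟨hc, hd⟩ | ⟨hd, hc⟩⟩, hd1, hd2, hd3⟩
    · exact ⟨⟨p.2, (hgadj c p.2).mpr ⟨p, hp, Or.inl ⟨hc, rfl⟩⟩, hd⟩,
        (hv2 d).mpr ⟨hd1, hd2, hd3⟩⟩
    · exact ⟨⟨p.1, (hgadj c p.1).mpr ⟨p, hp, Or.inr ⟨hc, rfl⟩⟩, hd⟩,
        (hv2 d).mpr ⟨hd1, hd2, hd3⟩⟩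

-- the two reachability relations have the same closure from ca
theorem pv_rtg_iff (len : Nat) (wires : List (Int × Int))
    (g : List (List Int)) (hgadj : ∀ (c : Nat) (y : Int),
      (y ∈ pvAdj g c ↔ ∃ p ∈ wires,
        (PySem.List.pyIdx? len p.1 = some c ∧ p.2 = y) ∨
        (PySem.List.pyIdx? len p.2 = some c ∧ p.1 = y)))
    (v2 : List Int) (ca cb : Nat)
    (hv2 : ∀ d, v2.getD d 1 = 0 ↔ (d < len ∧ d ≠ ca ∧ d ≠ cb))
    (d : Nat) :
    Relation.ReflTransGen (fun a b => b ∈ pvNew len v2 (pvAdj g a)) ca d ↔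
      d ∈ pvM len ca cb wires := by
  constructor
  · intro h
    induction h with
    | refl => exact Relation.ReflTransGen.refl
    | tail hab hbc ih =>
      exact Relation.ReflTransGen.tail ih
        ((pv_new_step_iff len wires g hgadj v2 ca cb hv2 _ _).mp hbc)
  · intro h
    induction h with
    | refl => exact Relation.ReflTransGen.refl
    | tail hab hbc ih =>
      exact Relation.ReflTransGen.tail ih
        ((pv_new_step_iff len wires g hgadj v2 ca cb hv2 _ _).mpr hbc)

-- pvM is the start cell plus what A's BFS reaches
theorem pvM_eq_insert (len : Nat) (wires : List (Int × Int))
    (g : List (List Int)) (hgadj : ∀ (c : Nat) (y : Int),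
      (y ∈ pvAdj g c ↔ ∃ p ∈ wires,
        (PySem.List.pyIdx? len p.1 = some c ∧ p.2 = y) ∨
        (PySem.List.pyIdx? len p.2 = some c ∧ p.1 = y)))
    (v2 : List Int) (ca cb : Nat)
    (hv2 : ∀ d, v2.getD d 1 = 0 ↔ (d < len ∧ d ≠ ca ∧ d ≠ cb)) :
    pvM len ca cb wires = insert ca (pvReach len g v2 {ca}) := by
  ext d
  constructor
  · intro hd
    by_cases hdca : d = ca
    · exact Or.inl hdca
    · refine Or.inr ⟨?_, ca, rfl, ?_⟩
      · rcases Relation.ReflTransGen.cases_tail hd with h | ⟨c, _, hstep⟩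
        · exact absurd h hdca
        · exact (hv2 d).mpr ⟨hstep.2.1, hstep.2.2⟩
      · exact (pv_rtg_iff len wires g hgadj v2 ca cb hv2 d).mpr hd
  · rintro (hd | ⟨h0, c, hc, hrtg⟩)
    · rw [hd]; exact Relation.ReflTransGen.refl
    · rw [Set.mem_singleton_iff] at hc
      rw [hc] at hrtg
      exact (pv_rtg_iff len wires g hgadj v2 ca cb hv2 d).mp hrtg

-- ----- B-side fixpoint analysis -----

theorem pvMark_flag {blocked : List Bool} {st : List Bool × Bool} {s t : Int}
    (h : st.2 = true) : (pvMark blocked st s t).2 = true := by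
  unfold pvMark
  split_ifs
  · rfl
  · exact h

theorem pvStepB_flag {blocked : List Bool} {st : List Bool × Bool} {p : Int × Int}
    (h : st.2 = true) : (pvStepB blocked st p).2 = true :=
  pvMark_flag (pvMark_flag h)

theorem pvPass_flag {blocked : List Bool} {l : List (Int × Int)} :
    ∀ {st : List Bool × Bool}, st.2 = true → (pvPass blocked l st).2 = true := by
  induction l with
  | nil => intro st h; exact h
  | cons p t ih => intro st h; exact ih (pvStepB_flag h)

theorem pvMark_false {blocked : List Bool} {st : List Bool × Bool} {s t : Int}
    (h : (pvMark blocked st s t).2 = false) :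
    pvMark blocked st s t = st ∧
      ¬(PySem.List.pyGetD st.1 s false = true ∧ PySem.List.pyGetD blocked t true = false
        ∧ PySem.List.pyGetD st.1 t true = false) := by
  by_cases hc : PySem.List.pyGetD st.1 s false = true ∧ PySem.List.pyGetD blocked t true = false
      ∧ PySem.List.pyGetD st.1 t true = false
  · exfalso
    unfold pvMark at h
    rw [if_pos hc] at h
    simp at h
  · unfold pvMark
    rw [if_neg hc]
    exact ⟨rfl, hc⟩

-- a pass that reports no change left the array untouched and every guard was false
theorem pvPass_fix {blocked : List Bool} :
    ∀ (l : List (Int × Int)) (r : List Bool), (pvPass blocked l (r, false)).2 = false →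
      (pvPass blocked l (r, false)).1 = r ∧ ∀ p ∈ l,
        ¬(PySem.List.pyGetD r p.1 false = true ∧ PySem.List.pyGetD blocked p.2 true = false
          ∧ PySem.List.pyGetD r p.2 true = false) ∧
        ¬(PySem.List.pyGetD r p.2 false = true ∧ PySem.List.pyGetD blocked p.1 true = false
          ∧ PySem.List.pyGetD r p.1 true = false) := by
  intro l
  induction l with
  | nil => intro r _; exact ⟨rfl, by simp⟩
  | cons p t ih =>
    intro r h
    have hstep : pvPass blocked (p :: t) (r, false) = pvPass blocked t (pvStepB blocked (r, false) p) := rfl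
    have hflag : (pvStepB blocked (r, false) p).2 = false := by
      by_contra hf
      have : (pvStepB blocked (r, false) p).2 = true := by
        cases hx : (pvStepB blocked (r, false) p).2
        · exact absurd hx hf
        · rfl
      rw [hstep] at h
      rw [pvPass_flag this] at h
      simp at h
    have hflag1 : (pvMark blocked (r, false) p.1 p.2).2 = false := by
      by_contra hf
      have h1 : (pvMark blocked (r, false) p.1 p.2).2 = true := by
        cases hx : (pvMark blocked (r, false) p.1 p.2).2
        · exact absurd hx hf
        · rfl
      have := pvMark_flag (blocked := blocked) (s := p.2) (t := p.1) h1
      unfold pvStepB at hflag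
      rw [this] at hflag
      simp at hflag
    obtain ⟨he1, hn1⟩ := pvMark_false hflag1
    have hflag2 : (pvMark blocked (r, false) p.2 p.1).2 = false := by
      unfold pvStepB at hflag
      rwa [he1] at hflag
    obtain ⟨he2, hn2⟩ := pvMark_false hflag2
    have hsteq : pvStepB blocked (r, false) p = (r, false) := by
      unfold pvStepB
      rw [he1, he2]
    rw [hstep, hsteq] at h
    obtain ⟨ha, hb⟩ := ih r h
    refine ⟨by rw [hstep, hsteq]; exact ha, ?_⟩
    intro q hq
    rcases List.mem_cons.mp hq with rfl | hq
    · exact ⟨hn1, hn2⟩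
    · exact hb q hq

-- the blocked array reads as "is this cell cb?"
theorem pv_blocked_char (len : Nat) (b : Int) (cb : Nat)
    (hb : PySem.List.pyIdx? len b = some cb) (t : Int) (ct : Nat)
    (ht : PySem.List.pyIdx? len t = some ct) :
    (PySem.List.pyGetD (PySem.List.pySetD (List.replicate len false) b true) t true = false
      ↔ ct ≠ cb) := by
  have hcb : cb < len := pv_pyIdx_lt hb
  have hb' : PySem.List.pyIdx? (List.replicate len (false : Bool)).length b = some cb := by
    rw [List.length_replicate]; exact hb
  have hset : PySem.List.pySetD (List.replicate len false) b true
      = (List.replicate len false).set cb true := pv_pySetD_some hb' true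
  have ht' : PySem.List.pyIdx? ((List.replicate len (false : Bool)).set cb true).length t
      = some ct := by rw [List.length_set, List.length_replicate]; exact ht
  rw [hset, pv_pyGetD_some ht' true]
  by_cases hct : ct = cb
  · rw [hct, pv_getD_set_self _ cb true true (by simpa using hcb)]
    simp
  · rw [pv_getD_set_ne _ cb ct true true hct, pv_getD_replicate]
    have hctlt : ct < len := pv_pyIdx_lt ht
    simp [hctlt, hct]

-- one relaxation preserves length, soundness w.r.t. pvM, and already-true cells
theorem pvMark_inv (len ca cb : Nat) (wires : List (Int × Int)) (blocked : List Bool)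
    (hblk : ∀ (t : Int) (ct : Nat), PySem.List.pyIdx? len t = some ct →
      (PySem.List.pyGetD blocked t true = false ↔ ct ≠ cb))
    (s t : Int) (cs ct : Nat)
    (hs : PySem.List.pyIdx? len s = some cs) (ht : PySem.List.pyIdx? len t = some ct)
    (hE : pvE len wires cs ct)
    (st : List Bool × Bool) (hlen : st.1.length = len)
    (hsound : ∀ c, c < len → st.1.getD c false = true → c ∈ pvM len ca cb wires) :
    (pvMark blocked st s t).1.length = len ∧
      (∀ c, c < len → (pvMark blocked st s t).1.getD c false = true → c ∈ pvM len ca cb wires) ∧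
      (∀ c, c < len → st.1.getD c false = true → (pvMark blocked st s t).1.getD c false = true) := by
  unfold pvMark
  split_ifs with h
  · obtain ⟨h1, h2, h3⟩ := h
    have hs' : PySem.List.pyIdx? st.1.length s = some cs := by rw [hlen]; exact hs
    have ht' : PySem.List.pyIdx? st.1.length t = some ct := by rw [hlen]; exact ht
    have hcs : st.1.getD cs false = true := by rwa [pv_pyGetD_some hs' false] at h1
    have hcsM : cs ∈ pvM len ca cb wires := hsound cs (pv_pyIdx_lt hs) hcs
    have hctcb : ct ≠ cb := (hblk t ct ht).mp h2
    have hctlt : ct < len := pv_pyIdx_lt ht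
    have hctM : ct ∈ pvM len ca cb wires := by
      by_cases hca : ct = ca
      · subst hca; exact Relation.ReflTransGen.refl
      · exact pvM_closed hcsM ⟨hE, hctlt, hca, hctcb⟩
    have hset : PySem.List.pySetD st.1 t true = st.1.set ct true := pv_pySetD_some ht' true
    refine ⟨?_, ?_, ?_⟩
    · simp only [hset]
      simpa using hlen
    · intro c hc hcv
      by_cases hcc : c = ct
      · subst hcc; exact hctM
      · rw [hset, pv_getD_set_ne _ ct c true false hcc] at hcv
        exact hsound c hc hcv
    · intro c hc hcv
      by_cases hcc : c = ct
      · subst hcc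
        rw [hset, pv_getD_set_self _ c true false (by rw [hlen]; exact hctlt)]
      · rw [hset, pv_getD_set_ne _ ct c true false hcc]
        exact hcv
  · exact ⟨hlen, hsound, fun c _ hc => hc⟩

theorem pvPass_inv (len ca cb : Nat) (wires : List (Int × Int)) (blocked : List Bool)
    (hblk : ∀ (t : Int) (ct : Nat), PySem.List.pyIdx? len t = some ct →
      (PySem.List.pyGetD blocked t true = false ↔ ct ≠ cb)) :
    ∀ (l : List (Int × Int)),
      (∀ p ∈ l, p ∈ wires ∧ PySem.Raise.InRange len p.1 ∧ PySem.Raise.InRange len p.2) →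
      ∀ (st : List Bool × Bool), st.1.length = len →
        (∀ c, c < len → st.1.getD c false = true → c ∈ pvM len ca cb wires) →
        (pvPass blocked l st).1.length = len ∧
          (∀ c, c < len → (pvPass blocked l st).1.getD c false = true →
            c ∈ pvM len ca cb wires) ∧
          (∀ c, c < len → st.1.getD c false = true →
            (pvPass blocked l st).1.getD c false = true) := by
  intro l
  induction l with
  | nil => intro _ st hlen hsound; exact ⟨hlen, hsound, fun c _ hc => hc⟩
  | cons p t ih =>
    intro hl st hlen hsound
    obtain ⟨hpw, hp1, hp2⟩ := hl p List.mem_cons_self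
    obtain ⟨c1, h1⟩ := pv_idx_exists hp1
    obtain ⟨c2, h2⟩ := pv_idx_exists hp2
    have hE12 : pvE len wires c1 c2 := ⟨p, hpw, Or.inl ⟨h1, h2⟩⟩
    have hE21 : pvE len wires c2 c1 := ⟨p, hpw, Or.inr ⟨h1, h2⟩⟩
    obtain ⟨m1len, m1sound, m1mono⟩ :=
      pvMark_inv len ca cb wires blocked hblk p.1 p.2 c1 c2 h1 h2 hE12 st hlen hsound
    obtain ⟨m2len, m2sound, m2mono⟩ :=
      pvMark_inv len ca cb wires blocked hblk p.2 p.1 c2 c1 h2 h1 hE21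
        (pvMark blocked st p.1 p.2) m1len m1sound
    have hstep : pvPass blocked (p :: t) st = pvPass blocked t (pvStepB blocked st p) := rfl
    obtain ⟨plen, psound, pmono⟩ :=
      ih (fun q hq => hl q (List.mem_cons_of_mem _ hq)) (pvStepB blocked st p) m2len m2sound
    refine ⟨by rw [hstep]; exact plen, by rw [hstep]; exact psound, ?_⟩
    intro c hc hcv
    rw [hstep]
    exact pmono c hc (m2mono c hc (m1mono c hc hcv))

-- the fixpoint loop: sound, monotone, and complete for pvM
theorem pvLoop_char (len ca cb : Nat) (wires : List (Int × Int)) (blocked : List Bool)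
    (hw : ∀ p ∈ wires, PySem.Raise.InRange len p.1 ∧ PySem.Raise.InRange len p.2)
    (hca : ca < len)
    (hblk : ∀ (t : Int) (ct : Nat), PySem.List.pyIdx? len t = some ct →
      (PySem.List.pyGetD blocked t true = false ↔ ct ≠ cb)) :
    ∀ (r : List Bool), r.length = len →
      (∀ c, c < len → r.getD c false = true → c ∈ pvM len ca cb wires) →
      r.getD ca false = true →
      (pvLoop blocked wires r).length = len ∧
        (∀ c, c < len → ((pvLoop blocked wires r).getD c false = true ↔
          c ∈ pvM len ca cb wires)) := by
  intro r
  induction r using pvLoop.induct blocked wires with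
  | case1 r hflag ih =>
    intro hlen hsound hstart
    obtain ⟨plen, psound, pmono⟩ :=
      pvPass_inv len ca cb wires blocked hblk wires (fun p hp => ⟨hp, hw p hp⟩)
        (r, false) hlen hsound
    rw [pvLoop, if_pos hflag]
    exact ih plen psound (pmono ca hca hstart)
  | case2 r hflag =>
    intro hlen hsound hstart
    have hflag' : (pvPass blocked wires (r, false)).2 = false := by
      cases hx : (pvPass blocked wires (r, false)).2
      · rfl
      · exact absurd hx hflag
    obtain ⟨hfix, hclosed⟩ := pvPass_fix wires r hflag'
    rw [pvLoop, if_neg hflag, hfix]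
    refine ⟨hlen, fun c hc => ⟨hsound c hc, ?_⟩⟩
    intro hcM
    -- completeness: the fixpoint array is closed, so it contains the whole of pvM
    induction hcM with
    | refl => exact hstart
    | tail hab hbc ihm =>
      rename_i cm dm
      obtain ⟨hE, hdlt, hdca, hdcb⟩ := hbc
      have hcmlt : cm < len := by
        rcases Relation.ReflTransGen.cases_tail hab with h | ⟨e, _, hstep⟩
        · omega
        · exact hstep.2.1
      have hcm : r.getD cm false = true := ihm hcmlt
      obtain ⟨p, hp, hor⟩ := hE
      obtain ⟨hn1, hn2⟩ := hclosed p hp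
      rcases hor with ⟨hx, hy⟩ | ⟨hx, hy⟩
      · -- p.1 is at cell cm, p.2 at cell dm; use the first guard's negation
        have hx' : PySem.List.pyIdx? r.length p.1 = some cm := by rw [hlen]; exact hx
        have hy' : PySem.List.pyIdx? r.length p.2 = some dm := by rw [hlen]; exact hy
        have hread1 : PySem.List.pyGetD r p.1 false = true := by
          rw [pv_pyGetD_some hx' false]; exact hcm
        have hread2 : PySem.List.pyGetD blocked p.2 true = false := (hblk p.2 dm hy).mpr hdcb
        have h3 : PySem.List.pyGetD r p.2 true = true := by
          by_contra hne
          exact hn1 ⟨hread1, hread2, by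
            cases hx3 : PySem.List.pyGetD r p.2 true
            · rfl
            · exact absurd hx3 hne⟩
        rw [pv_pyGetD_some hy' true] at h3
        rw [pv_getD_lt r dm (by omega) false]
        rw [pv_getD_lt r dm (by omega) true] at h3
        exact h3
      · -- p.2 is at cell cm, p.1 at cell dm; use the second guard's negation
        have hx' : PySem.List.pyIdx? r.length p.1 = some dm := by rw [hlen]; exact hx
        have hy' : PySem.List.pyIdx? r.length p.2 = some cm := by rw [hlen]; exact hy
        have hread1 : PySem.List.pyGetD r p.2 false = true := by
          rw [pv_pyGetD_some hy' false]; exact hcm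
        have hread2 : PySem.List.pyGetD blocked p.1 true = false := (hblk p.1 dm hx).mpr hdcb
        have h3 : PySem.List.pyGetD r p.1 true = true := by
          by_contra hne
          exact hn2 ⟨hread1, hread2, by
            cases hx3 : PySem.List.pyGetD r p.1 true
            · rfl
            · exact absurd hx3 hne⟩
        rw [pv_pyGetD_some hx' true] at h3
        rw [pv_getD_lt r dm (by omega) false]
        rw [pv_getD_lt r dm (by omega) true] at h3
        exact h3

-- counting: Python's sum over booleans, and true-cells as a Finset
theorem pv_foldl_sum (l : List Bool) (a : Int) :
    l.foldl (fun s v => s + if v then (1 : Int) else 0) a = a + (l.count true : Int) := by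
  induction l generalizing a with
  | nil => simp
  | cons x t ih =>
    rw [List.foldl_cons, ih]
    cases x <;> simp <;> push_cast <;> ring

theorem pv_card_filter (r : List Bool) :
    ((Finset.range r.length).filter (fun c => r.getD c false = true)).card = r.count true := by
  induction r using List.reverseRecOn with
  | nil => simp
  | append_singleton t x ih =>
    rw [List.length_append, List.length_singleton, Finset.range_add_one, Finset.filter_insert]
    have hcongr : ((Finset.range t.length).filter
        (fun c => (t ++ [x]).getD c false = true)).card
        = ((Finset.range t.length).filter (fun c => t.getD c false = true)).card := by
      congr 1
      refine Finset.filter_congr ?_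
      intro c hc
      rw [Finset.mem_range] at hc
      rw [List.getD_eq_getElem?_getD, List.getElem?_append_left hc,
        ← List.getD_eq_getElem?_getD]
    have hlast : (t ++ [x]).getD t.length false = x := by
      rw [List.getD_eq_getElem?_getD, List.getElem?_append_right (le_refl _)]
      simp
    rw [List.count_append]
    cases x
    · rw [if_neg (by rw [hlast]; simp), hcongr, ih]
      simp
    · rw [if_pos (by rw [hlast]), Finset.card_insert_of_notMem (by simp), hcongr, ih]
      simp

-- the per-edge values of A and B agree
theorem pv_edge_eq (n : Int) (wires : List (Int × Int))
    (hw : ∀ p ∈ wires, PySem.Raise.InRange (n + 1).toNat p.1 ∧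
      PySem.Raise.InRange (n + 1).toNat p.2)
    (ab : Int × Int) (hab : ab ∈ wires) :
    pvBfsA ab.1 (wires.foldl pvBuildStep (List.replicate (n + 1).toNat ([] : List Int)))
        (PySem.List.pySetD (List.replicate (n + 1).toNat (0 : Int)) ab.2 1)
      = (pvLoop (PySem.List.pySetD (List.replicate (n + 1).toNat false) ab.2 true) wires
          (PySem.List.pySetD (List.replicate (n + 1).toNat false) ab.1 true)).foldl
          (fun s v => s + if v then (1 : Int) else 0) 0 := by
  set len := (n + 1).toNat with hlendef
  obtain ⟨ha, hb⟩ := hw ab hab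
  obtain ⟨ca, hca⟩ := pv_idx_exists ha
  obtain ⟨cb, hcb⟩ := pv_idx_exists hb
  have hcalt : ca < len := pv_pyIdx_lt hca
  have hcblt : cb < len := pv_pyIdx_lt hcb
  set g := wires.foldl pvBuildStep (List.replicate len ([] : List Int)) with hgdef
  have hg : g.length = len := by
    rw [hgdef, pv_graph_length, List.length_replicate]
  have hgadj : ∀ (c : Nat) (y : Int),
      (y ∈ pvAdj g c ↔ ∃ p ∈ wires,
        (PySem.List.pyIdx? len p.1 = some c ∧ p.2 = y) ∨
        (PySem.List.pyIdx? len p.2 = some c ∧ p.1 = y)) := by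
    intro c y
    rw [hgdef, pv_build_adj len wires hw (List.replicate len []) (List.length_replicate) c y]
    unfold pvAdj
    rw [pv_getD_replicate]
    split_ifs <;> simp
  -- A side
  set v2 := PySem.List.pySetD (PySem.List.pySetD (List.replicate len (0 : Int)) ab.2 1) ab.1 1
    with hv2def
  have hv2 := pv_v2_char len ab.1 ab.2 ca cb hca hcb
  rw [← hv2def] at hv2
  have hv2len : v2.length = len := by
    rw [hv2def, PySem.List.length_pySetD, PySem.List.length_pySetD, List.length_replicate]
  have hcamk : v2.getD ca 1 ≠ 0 := by
    intro h0
    exact absurd rfl ((hv2 ca).mp h0).2.1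
  have hinv : pvInv len v2 [ab.1] := by
    intro y hy
    rw [List.mem_singleton] at hy
    subst hy
    exact ⟨ca, hca, hcamk⟩
  have hA : pvBfsA ab.1 g (PySem.List.pySetD (List.replicate len (0 : Int)) ab.2 1)
      = 1 + ((pvReach len g v2 {ca}).ncard : Int) := by
    unfold pvBfsA
    rw [← hv2def] -- ?
    rw [pvBfsLoop_spec len g hg [ab.1] v2 1 hv2len hinv]
    congr 2
    rw [pv_cells_cons len [] ab.1 ca hca, pv_cells_nil]
    simp
  -- relate to pvM
  have hM := pvM_eq_insert len wires g hgadj v2 ca cb hv2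
  have hnotmem : ca ∉ pvReach len g v2 {ca} := by
    rintro ⟨h0, -⟩
    exact hcamk h0
  have hMcard : (pvM len ca cb wires).ncard = (pvReach len g v2 {ca}).ncard + 1 := by
    rw [hM, Set.ncard_insert_of_notMem hnotmem (pvReach_finite len g v2 {ca} hv2len)]
  -- B side
  set blocked := PySem.List.pySetD (List.replicate len false) ab.2 true with hblkdef
  have hblk : ∀ (t : Int) (ct : Nat), PySem.List.pyIdx? len t = some ct →
      (PySem.List.pyGetD blocked t true = false ↔ ct ≠ cb) := by
    intro t ct ht
    rw [hblkdef]
    exact pv_blocked_char len ab.2 cb hcb t ct ht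
  set r0 := PySem.List.pySetD (List.replicate len false) ab.1 true with hr0def
  have ha' : PySem.List.pyIdx? (List.replicate len (false : Bool)).length ab.1 = some ca := by
    rw [List.length_replicate]; exact hca
  have hr0set : r0 = (List.replicate len false).set ca true := by
    rw [hr0def]; exact pv_pySetD_some ha' true
  have hr0len : r0.length = len := by
    rw [hr0set, List.length_set, List.length_replicate]
  have hr0sound : ∀ c, c < len → r0.getD c false = true → c ∈ pvM len ca cb wires := by
    intro c hc hcv
    by_cases hcc : c = ca
    · subst hcc; exact Relation.ReflTransGen.refl
    · rw [hr0set, pv_getD_set_ne _ ca c true false hcc, pv_getD_replicate, if_pos hc] at hcv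
      simp at hcv
  have hr0start : r0.getD ca false = true := by
    rw [hr0set, pv_getD_set_self _ ca true false (by simpa using hcalt)]
  obtain ⟨hrfl, hrfc⟩ := pvLoop_char len ca cb wires blocked hw hcalt hblk r0
    hr0len hr0sound hr0start
  set rf := pvLoop blocked wires r0 with hrfdef
  -- count the true cells of rf
  have hsetF : pvM len ca cb wires
      = ↑((Finset.range len).filter (fun c => rf.getD c false = true)) := by
    ext c
    simp only [Finset.coe_filter, Set.mem_setOf_eq, Finset.mem_range]
    constructor
    · intro hc
      exact ⟨pvM_lt hcalt hc, (hrfc c (pvM_lt hcalt hc)).mpr hc⟩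
    · rintro ⟨hc, hcv⟩
      exact (hrfc c hc).mp hcv
  have hcount : ((pvM len ca cb wires).ncard : Int) = (rf.count true : Int) := by
    rw [hsetF, Set.ncard_coe_finset]
    congr 1
    rw [← pv_card_filter rf, hrfl]
  rw [hA, pv_foldl_sum rf 0]
  have : ((pvReach len g v2 {ca}).ncard : Int) + 1 = (rf.count true : Int) := by
    rw [← hcount, hMcard]
    push_cast
    ring
  omega

-- ===== VERDICT (by name: the statement is the Claim_ definition above) =====
theorem solution_spec : Claim_equal_solution := by
  unfold Claim_equal_solution
  intro n wires hdom hpre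
  unfold Spec_solution solution solution_alt
  refine PySem.List.foldl_congr_mem wires _ _ 99 ?_
  intro acc ab hab
  dsimp only
  rw [pv_edge_eq n wires hpre ab hab]
  congr 2
  ring
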